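-- pv_equiv track=rewrite | github.com/wenke727/learningNote | algorithm/alg/graph.py | get_next_position
-- ===== SOURCE A (Python) =====
-- def get_next_position(heights, k):
--     n = len(heights)
--     next_position = {}
--     stack = []
--     for i in range(n):
--         while stack and heights[stack[-1]] < heights[i]:
--             if i - stack[-1] <= k:
--                 next_position[stack[-1]] = i
--             stack.pop()
--         stack.append(i)
--
--     return next_position
-- ===== SOURCE B (Python) =====
-- def get_next_position(heights, k):
--     # Nested window scan instead of a monotonic stack: for each j, walk left
--     # through indices whose values stay below heights[j]; i gets entry j exactly
--     # when every value strictly between is <= heights[i] (tracked by running max m).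
--     n = len(heights)
--     res = {}
--     for j in range(n):
--         lower = max(0, j - k)
--         m = None
--         for i in range(j - 1, lower - 1, -1):
--             if heights[i] >= heights[j]:
--                 break
--             if m is None or m <= heights[i]:
--                 res[i] = j
--             m = heights[i] if m is None else max(m, heights[i])
--     return res
-- ===== Notes on version B (the rewrite author's own statement) =====
-- stated objective: alternative
-- what changed: Replaced the monotonic stack (pop-and-record while scanning forward) by a stack-free nested window scan: for each j it walks left from j-1, breaking at the first value >= heights[j], and records i->j when a running maximum shows every value strictly between i and j is <= heights[i].
import Mathlib
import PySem

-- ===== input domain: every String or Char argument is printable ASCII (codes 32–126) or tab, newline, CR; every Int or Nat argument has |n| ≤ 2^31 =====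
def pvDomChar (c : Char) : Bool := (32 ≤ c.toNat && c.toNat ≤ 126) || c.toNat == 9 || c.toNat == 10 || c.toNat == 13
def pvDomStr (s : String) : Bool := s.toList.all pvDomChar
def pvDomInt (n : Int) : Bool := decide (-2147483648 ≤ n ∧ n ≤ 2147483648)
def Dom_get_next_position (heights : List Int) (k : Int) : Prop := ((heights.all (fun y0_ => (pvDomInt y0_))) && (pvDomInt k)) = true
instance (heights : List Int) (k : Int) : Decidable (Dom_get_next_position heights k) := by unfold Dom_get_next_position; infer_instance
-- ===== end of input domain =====

-- B replaces A's monotonic stack by a stack-free nested window scan (same values, same insertion order); objective: alternative.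

-- ===== PORT A =====
-- heights[i]; every access in either program is at an in-range index, so the default is never used
def pvH (hs : List Int) (i : Int) : Int := (PySem.List.pyGet? hs i).getD 0

-- A's 'while stack and heights[stack[-1]] < heights[i]' loop; the stack's head is Python's stack[-1]
def pvPopA (hs : List Int) (k i : Int) :
    PySem.Dict Int Int → List Int → PySem.Dict Int Int × List Int
  | np, [] => (np, [])
  | np, t :: rest =>
    if pvH hs t < pvH hs i then
      pvPopA hs k i (if i - t ≤ k then np.insert t i else np) rest
    else (np, t :: rest)

def get_next_position (heights : List Int) (k : Int) : List (Int × Int) :=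
  ((PySem.List.pyRange 0 (heights.length : Int) 1).foldl
    (fun st i =>
      let st' := pvPopA heights k i st.1 st.2
      (st'.1, i :: st'.2))
    (PySem.Dict.empty, ([] : List Int))).1.items

-- ===== PORT B =====
-- B's inner 'for i in range(j-1, lower-1, -1)' loop with its break; m is the running maximum
def pvScanB (hs : List Int) (j : Int) :
    Option Int → PySem.Dict Int Int → List Int → PySem.Dict Int Int
  | _, res, [] => res
  | m, res, i :: rest =>
    if pvH hs j ≤ pvH hs i then res
    else
      pvScanB hs j
        (some (match m with | none => pvH hs i | some v => max v (pvH hs i)))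
        (if (match m with | none => true | some v => decide (v ≤ pvH hs i)) then res.insert i j else res)
        rest

def get_next_position_alt (heights : List Int) (k : Int) : List (Int × Int) :=
  ((PySem.List.pyRange 0 (heights.length : Int) 1).foldl
    (fun res j =>
      let lower := max 0 (j - k)
      pvScanB heights j none res (PySem.List.pyRange (j - 1) (lower - 1) (-1)))
    PySem.Dict.empty).items

-- ===== PRECONDITION & SPEC =====
def Spec_get_next_position (heights : List Int) (k : Int) (out : List (Int × Int)) : Prop := out = get_next_position_alt heights k
instance (heights : List Int) (k : Int) (out : List (Int × Int)) : Decidable (Spec_get_next_position heights k out) := by unfold Spec_get_next_position; infer_instance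

-- ===== CLAIM (what is proved, stated in full; the proofs are below) =====
def Claim_equal_get_next_position : Prop := ∀ (heights : List Int) (k : Int), Dom_get_next_position heights k → Spec_get_next_position heights k (get_next_position heights k)

-- ===== LEMMAS AND PROOFS =====

-- the two folds, named for the proofs (same lambdas as in the ports)
def pvFoldA (hs : List Int) (k : Int) (m : Nat) : PySem.Dict Int Int × List Int :=
  (PySem.List.pyRange 0 (m : Int) 1).foldl
    (fun st i =>
      let st' := pvPopA hs k i st.1 st.2
      (st'.1, i :: st'.2))
    (PySem.Dict.empty, ([] : List Int))

def pvFoldB (hs : List Int) (k : Int) (m : Nat) : PySem.Dict Int Int :=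
  (PySem.List.pyRange 0 (m : Int) 1).foldl
    (fun res j =>
      let lower := max 0 (j - k)
      pvScanB hs j none res (PySem.List.pyRange (j - 1) (lower - 1) (-1)))
    PySem.Dict.empty

-- 'i has no strictly greater element among heights[i+1..j-1]'
def pvQb (hs : List Int) (j i : Int) : Bool :=
  (PySem.List.pyRange (i + 1) j 1).all (fun t => decide (pvH hs t ≤ pvH hs i))

-- A's stack after j rounds, characterized: indices of [0,j) with no greater element yet, descending
def pvStack (hs : List Int) (j : Int) : List Int :=
  (PySem.List.pyRange (j - 1) (-1) (-1)).filter (pvQb hs j)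

def pvMOk (m : Option Int) (x : Int) : Bool :=
  match m with | none => true | some v => decide (v ≤ x)

lemma pvQb_iff (hs : List Int) (j i : Int) :
    pvQb hs j i = true ↔ ∀ t : Int, i < t → t < j → pvH hs t ≤ pvH hs i := by
  simp only [pvQb, List.all_eq_true, PySem.List.mem_pyRange_one, decide_eq_true_eq]
  constructor
  · intro h t h1 h2; exact h t ⟨by omega, h2⟩
  · intro h t ht; exact h t (by omega) ht.2

lemma pvStack_pairwise (hs : List Int) (j : Int) :
    (pvStack hs j).Pairwise (fun a b => b < a ∧ pvH hs a ≤ pvH hs b) := by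
  have h1 : (PySem.List.pyRange (j - 1) (-1) (-1)).Pairwise (fun a b => b < a) := by
    rw [PySem.List.pyRange_neg_one_eq_reverse, List.pairwise_reverse]
    exact PySem.List.pairwise_lt_pyRange_one _ _
  have h2 : (pvStack hs j).Pairwise (fun a b => b < a) := List.Pairwise.filter _ h1
  refine List.Pairwise.imp_of_mem ?_ h2
  intro a b ha hb hab
  refine ⟨hab, ?_⟩
  have hqb : pvQb hs j b = true := List.of_mem_filter hb
  have hma : a ∈ PySem.List.pyRange (j - 1) (-1) (-1) := List.mem_of_mem_filter ha
  rw [PySem.List.mem_pyRange_neg_one] at hma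
  exact (pvQb_iff hs j b).1 hqb a hab (by omega)

lemma mem_pvStack (hs : List Int) (j i : Int) (h : i ∈ pvStack hs j) :
    0 ≤ i ∧ i < j ∧ pvQb hs j i = true := by
  have hq : pvQb hs j i = true := List.of_mem_filter h
  have hm : i ∈ PySem.List.pyRange (j - 1) (-1) (-1) := List.mem_of_mem_filter h
  rw [PySem.List.mem_pyRange_neg_one] at hm
  exact ⟨by omega, by omega, hq⟩

-- keys already recorded are never candidates again
lemma pvFresh (hs : List Int) (j : Int) (np : PySem.Dict Int Int)
    (hpp : ∀ p ∈ np.items, p.1 < p.2 ∧ p.2 < j ∧ pvH hs p.1 < pvH hs p.2)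
    (t : Int) (hq : pvQb hs j t = true) : np.contains t = false := by
  by_contra hc
  rw [Bool.not_eq_false, PySem.Dict.contains_iff_mem_keys] at hc
  simp only [PySem.Dict.keys, List.mem_map] at hc
  obtain ⟨p, hp, hpt⟩ := hc
  obtain ⟨h1, h2, h3⟩ := hpp p hp
  have := (pvQb_iff hs j t).1 hq p.2 (by omega) h2
  rw [hpt] at h3; omega

-- the pop loop, on a stack that is descending with nondecreasing heights
lemma pvPopA_spec (hs : List Int) (k j : Int) :
    ∀ (S : List Int) (np : PySem.Dict Int Int),
    S.Pairwise (fun a b => b < a ∧ pvH hs a ≤ pvH hs b) →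
    (∀ t ∈ S, pvH hs t < pvH hs j → np.contains t = false) →
    (pvPopA hs k j np S).1.items =
        np.items ++ ((S.filter (fun t => decide (pvH hs t < pvH hs j) && decide (j - t ≤ k))).map (fun t => (t, j))) ∧
    (pvPopA hs k j np S).2 = S.filter (fun t => decide (pvH hs j ≤ pvH hs t)) := by
  intro S
  induction S with
  | nil => intro np _ _; simp [pvPopA]
  | cons t rest ih =>
    intro np hpw hfresh
    rcases List.pairwise_cons.1 hpw with ⟨hhead, htail⟩
    by_cases hlt : pvH hs t < pvH hs j
    · have hstep : pvPopA hs k j np (t :: rest) =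
          pvPopA hs k j (if j - t ≤ k then np.insert t j else np) rest := by
        simp [pvPopA, hlt]
      have hcont : np.contains t = false := hfresh t (List.mem_cons_self) hlt
      have hfresh' : ∀ t' ∈ rest, pvH hs t' < pvH hs j →
          (if j - t ≤ k then np.insert t j else np).contains t' = false := by
        intro t' ht' hlt'
        have hne : t' ≠ t := by have := (hhead t' ht').1; omega
        split
        · rw [PySem.Dict.contains_insert]
          simp [hne, hfresh t' (List.mem_cons_of_mem _ ht') hlt']
        · exact hfresh t' (List.mem_cons_of_mem _ ht') hlt'
      obtain ⟨hi, hst⟩ := ih (if j - t ≤ k then np.insert t j else np) htail hfresh'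
      constructor
      · rw [hstep, hi]
        by_cases hd : j - t ≤ k
        · simp only [if_pos hd, PySem.Dict.items_insert_of_not_contains _ _ hcont]
          rw [List.filter_cons_of_pos (by simp [hlt, hd])]
          simp
        · simp only [if_neg hd]
          rw [List.filter_cons_of_neg (by simp [hlt, hd])]
      · rw [hstep, hst]
        rw [List.filter_cons_of_neg (by simp; omega)]
    · have hstep : pvPopA hs k j np (t :: rest) = (np, t :: rest) := by
        simp [pvPopA, hlt]
      constructor
      · rw [hstep]
        have : (t :: rest).filter (fun t => decide (pvH hs t < pvH hs j) && decide (j - t ≤ k)) = [] := by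
          rw [List.filter_eq_nil_iff]
          intro x hx
          rcases List.mem_cons.1 hx with h | h
          · subst h; simp [hlt]
          · have : pvH hs t ≤ pvH hs x := (hhead x h).2
            simp [show ¬ pvH hs x < pvH hs j by omega]
        rw [this]; simp
      · rw [hstep]
        have : rest.filter (fun t => decide (pvH hs j ≤ pvH hs t)) = rest := by
          rw [List.filter_eq_self]
          intro x hx
          have : pvH hs t ≤ pvH hs x := (hhead x hx).2
          simp; omega
        simp [show pvH hs j ≤ pvH hs t by omega, this]

-- stack transition: push j after filtering out the popped elements
lemma pvStack_succ (hs : List Int) (j : Int) (hj : 0 ≤ j) :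
    pvStack hs (j + 1) = j :: (pvStack hs j).filter (fun t => decide (pvH hs j ≤ pvH hs t)) := by
  unfold pvStack
  have h1 : PySem.List.pyRange (j + 1 - 1) (-1) (-1) = j :: PySem.List.pyRange (j - 1) (-1) (-1) := by
    have := PySem.List.pyRange_neg_one_cons (a := j) (b := -1) (by omega)
    simpa using this
  rw [h1]
  rw [List.filter_cons_of_pos (by
    simp only [pvQb]
    rw [show PySem.List.pyRange (j + 1) (j + 1) 1 = [] from PySem.List.pyRange_one_eq_nil (by omega)]
    rfl)]
  congr 1
  rw [List.filter_filter]
  apply List.filter_congr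
  intro x hx
  rw [PySem.List.mem_pyRange_neg_one] at hx
  have hsplit : PySem.List.pyRange (x + 1) (j + 1) 1 =
      PySem.List.pyRange (x + 1) j 1 ++ [j] := by
    rw [PySem.List.pyRange_one_append (a := x + 1) (m := j) (b := j + 1) (by omega) (by omega)]
    rw [PySem.List.pyRange_one_singleton]
  simp only [pvQb, hsplit, List.all_append, List.all_cons, List.all_nil, Bool.and_true]
  rw [Bool.and_comm]

-- restricting a countdown range is a filter
lemma pvRange_filter (b c : Int) (hbc : b ≤ c) :
    ∀ (n : Nat) (a : Int), (a - b).toNat = n →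
    (PySem.List.pyRange a b (-1)).filter (fun x => decide (c < x)) = PySem.List.pyRange a c (-1) := by
  intro n
  induction n with
  | zero =>
    intro a ha
    rw [PySem.List.pyRange_neg_one_eq_nil (by omega), PySem.List.pyRange_neg_one_eq_nil (by omega)]
    rfl
  | succ n ih =>
    intro a ha
    have hba : b < a := by omega
    rw [PySem.List.pyRange_neg_one_cons (a := a) (b := b) hba]
    by_cases hc : c < a
    · rw [List.filter_cons_of_pos (by simp [hc]),
        show PySem.List.pyRange a c (-1) = a :: PySem.List.pyRange (a - 1) c (-1) from
          PySem.List.pyRange_neg_one_cons hc,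
        ih (a - 1) (by omega)]
    · have hnil : (PySem.List.pyRange (a - 1) b (-1)).filter (fun x => decide (c < x)) = [] := by
        rw [List.filter_eq_nil_iff]
        intro x hx
        rw [PySem.List.mem_pyRange_neg_one] at hx
        simp; omega
      rw [List.filter_cons_of_neg (by simp [hc]), hnil,
        PySem.List.pyRange_neg_one_eq_nil (a := a) (b := c) (by omega)]

-- the running maximum update of the scan
def pvMUp (m : Option Int) (x : Int) : Int := match m with | none => x | some v => max v x

-- the scan loop: records exactly the stack-popped indices of the window, top down
lemma pvScanB_spec (hs : List Int) (j lo : Int) :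
    ∀ (c : Nat) (i0 : Int) (m : Option Int) (np : PySem.Dict Int Int),
    i0 = lo - 1 + c →
    i0 ≤ j - 1 →
    (∀ x : Int, pvMOk m x = true ↔ ∀ t : Int, i0 < t → t < j → pvH hs t ≤ x) →
    (∀ t ∈ PySem.List.pyRange i0 (lo - 1) (-1), pvQb hs j t = true → np.contains t = false) →
    (pvScanB hs j m np (PySem.List.pyRange i0 (lo - 1) (-1))).items =
      np.items ++ ((PySem.List.pyRange i0 (lo - 1) (-1)).filter
        (fun i => pvQb hs j i && decide (pvH hs i < pvH hs j))).map (fun i => (i, j)) := by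
  intro c
  induction c with
  | zero =>
    intro i0 m np h0 _ _ _
    rw [PySem.List.pyRange_neg_one_eq_nil (by omega)]
    simp [pvScanB]
  | succ c ih =>
    intro i0 m np h0 hij hm hfresh
    have hcons : PySem.List.pyRange i0 (lo - 1) (-1) = i0 :: PySem.List.pyRange (i0 - 1) (lo - 1) (-1) :=
      PySem.List.pyRange_neg_one_cons (by omega)
    rw [hcons]
    by_cases hbr : pvH hs j ≤ pvH hs i0
    · rw [show pvScanB hs j m np (i0 :: PySem.List.pyRange (i0 - 1) (lo - 1) (-1)) = np by
        simp [pvScanB, hbr]]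
      have hnil : (i0 :: PySem.List.pyRange (i0 - 1) (lo - 1) (-1)).filter
          (fun i => pvQb hs j i && decide (pvH hs i < pvH hs j)) = [] := by
        rw [List.filter_eq_nil_iff]
        intro x hx
        rcases List.mem_cons.1 hx with h | h
        · subst h; simp [show ¬ pvH hs x < pvH hs j by omega]
        · rw [PySem.List.mem_pyRange_neg_one] at h
          by_cases hq : pvQb hs j x = true
          · have : pvH hs i0 ≤ pvH hs x := (pvQb_iff hs j x).1 hq i0 (by omega) (by omega)
            simp [show ¬ pvH hs x < pvH hs j by omega]
          · simp [Bool.not_eq_true] at hq ⊢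
            intro h'; exact absurd h' (by simp [hq])
      rw [hnil]; simp
    · have hlt : pvH hs i0 < pvH hs j := by omega
      have hqiff : (pvMOk m (pvH hs i0) = true) ↔ pvQb hs j i0 = true := by
        rw [hm (pvH hs i0), pvQb_iff]
      have hstep : pvScanB hs j m np (i0 :: PySem.List.pyRange (i0 - 1) (lo - 1) (-1)) =
          pvScanB hs j
            (some (pvMUp m (pvH hs i0)))
            (if pvMOk m (pvH hs i0) = true then np.insert i0 j else np)
            (PySem.List.pyRange (i0 - 1) (lo - 1) (-1)) := by
        cases m <;> simp [pvScanB, if_neg hbr, pvMUp, pvMOk]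
      have hm' : ∀ x : Int, pvMOk (some (pvMUp m (pvH hs i0))) x = true ↔
          ∀ t : Int, i0 - 1 < t → t < j → pvH hs t ≤ x := by
        intro x
        have hold := hm x
        cases m with
        | none =>
          simp only [pvMOk, pvMUp, decide_eq_true_eq] at hold ⊢
          constructor
          · intro hx t h1 h2
            by_cases ht : t = i0
            · subst ht; exact hx
            · exact (hold.1 trivial) t (by omega) h2
          · intro hx; exact hx i0 (by omega) (by omega)
        | some v =>
          simp only [pvMOk, pvMUp, max_le_iff, decide_eq_true_eq] at hold ⊢
          constructor
          · intro hx t h1 h2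
            by_cases ht : t = i0
            · subst ht; omega
            · exact (hold.1 (by omega)) t (by omega) h2
          · intro hx
            have h1 : v ≤ x := hold.2 (fun t h1 h2 => hx t (by omega) h2)
            have h2 : pvH hs i0 ≤ x := hx i0 (by omega) (by omega)
            omega
      by_cases hrec : pvMOk m (pvH hs i0) = true
      · have hq : pvQb hs j i0 = true := hqiff.1 hrec
        have hcont : np.contains i0 = false := by
          apply hfresh i0 _ hq
          rw [hcons]; exact List.mem_cons_self
        have hfresh' : ∀ t ∈ PySem.List.pyRange (i0 - 1) (lo - 1) (-1), pvQb hs j t = true →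
            (np.insert i0 j).contains t = false := by
          intro t ht hq'
          rw [PySem.List.mem_pyRange_neg_one] at ht
          rw [PySem.Dict.contains_insert]
          have : t ≠ i0 := by omega
          simp [this]
          apply hfresh t _ hq'
          rw [hcons]
          exact List.mem_cons_of_mem _ (by rw [PySem.List.mem_pyRange_neg_one]; omega)
        rw [hstep, if_pos hrec,
          ih (i0 - 1) _ (np.insert i0 j) (by omega) (by omega) hm' hfresh',
          PySem.Dict.items_insert_of_not_contains _ _ hcont,
          List.filter_cons_of_pos (by simp [hq, hlt])]
        simp
      · have hq : pvQb hs j i0 = false := by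
          rw [← Bool.not_eq_true]; intro h; exact hrec (hqiff.2 h)
        have hfresh' : ∀ t ∈ PySem.List.pyRange (i0 - 1) (lo - 1) (-1), pvQb hs j t = true →
            np.contains t = false := by
          intro t ht hq'
          apply hfresh t _ hq'
          rw [hcons]; exact List.mem_cons_of_mem _ ht
        rw [hstep, if_neg hrec,
          ih (i0 - 1) _ np (by omega) (by omega) hm' hfresh',
          List.filter_cons_of_neg (by simp [hq])]

-- one whole round of B's outer loop
lemma pvScanRound (hs : List Int) (k j : Int) (np : PySem.Dict Int Int)
    (hfresh : ∀ t : Int, pvQb hs j t = true → np.contains t = false) :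
    (pvScanB hs j none np (PySem.List.pyRange (j - 1) (max 0 (j - k) - 1) (-1))).items =
      np.items ++ ((PySem.List.pyRange (j - 1) (max 0 (j - k) - 1) (-1)).filter
        (fun i => pvQb hs j i && decide (pvH hs i < pvH hs j))).map (fun i => (i, j)) := by
  by_cases hcase : max 0 (j - k) ≤ j
  · apply pvScanB_spec hs j (max 0 (j - k)) ((j - max 0 (j - k)).toNat) (j - 1) none np
      (by omega) (by omega)
    · intro x
      simp only [pvMOk, true_iff]
      intro t h1 h2; omega
    · intro t _ hq; exact hfresh t hq
  · rw [PySem.List.pyRange_neg_one_eq_nil (by omega)]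
    simp [pvScanB]

-- A's per-round entries and B's per-round entries are the same list
lemma pvE_eq (hs : List Int) (k j : Int) :
    ((pvStack hs j).filter (fun t => decide (pvH hs t < pvH hs j) && decide (j - t ≤ k))) =
    ((PySem.List.pyRange (j - 1) (max 0 (j - k) - 1) (-1)).filter
      (fun i => pvQb hs j i && decide (pvH hs i < pvH hs j))) := by
  unfold pvStack
  rw [List.filter_filter]
  rw [show PySem.List.pyRange (j - 1) (max 0 (j - k) - 1) (-1)
      = (PySem.List.pyRange (j - 1) (-1) (-1)).filter (fun x => decide (max 0 (j - k) - 1 < x)) from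
    (pvRange_filter (-1) (max 0 (j - k) - 1) (by omega) (j - 1 - (-1)).toNat (j - 1) rfl).symm]
  rw [List.filter_filter]
  apply List.filter_congr
  intro x hx
  rw [PySem.List.mem_pyRange_neg_one] at hx
  cases hq : pvQb hs j x
  · simp
  · by_cases hl : pvH hs x < pvH hs j
    · simp only [Bool.and_true, Bool.true_and, hl, decide_true]
      rw [show (decide (j - x ≤ k)) = (decide (max 0 (j - k) - 1 < x)) by
        simp only [decide_eq_decide]; omega]
    · simp [hl]

-- the coupled induction: stack shape, recorded-pairs facts, and B's dict = A's dict
lemma pvMain (hs : List Int) (k : Int) : ∀ (m : Nat),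
    (pvFoldA hs k m).2 = pvStack hs (m : Int) ∧
    (∀ p ∈ (pvFoldA hs k m).1.items,
        0 ≤ p.1 ∧ p.1 < p.2 ∧ p.2 < (m : Int) ∧ pvH hs p.1 < pvH hs p.2) ∧
    pvFoldB hs k m = (pvFoldA hs k m).1 := by
  intro m
  induction m with
  | zero =>
    refine ⟨?_, ?_, rfl⟩
    · unfold pvFoldA pvStack
      rw [show ((0 : Nat) : Int) = 0 by norm_num, PySem.List.pyRange_one_eq_nil (by omega),
        PySem.List.pyRange_neg_one_eq_nil (by omega)]
      rfl
    · unfold pvFoldA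
      rw [show ((0 : Nat) : Int) = 0 by norm_num, PySem.List.pyRange_one_eq_nil (by omega)]
      intro p hp
      simp [PySem.Dict.empty] at hp
  | succ m ih =>
    obtain ⟨ihS, ihP, ihB⟩ := ih
    have hrange : PySem.List.pyRange 0 ((m + 1 : Nat) : Int) 1
        = PySem.List.pyRange 0 (m : Int) 1 ++ [(m : Int)] := by
      push_cast
      exact PySem.List.pyRange_one_succ_right (Int.natCast_nonneg m)
    have hAstep : pvFoldA hs k (m + 1) =
        let st' := pvPopA hs k (m : Int) (pvFoldA hs k m).1 (pvFoldA hs k m).2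
        (st'.1, (m : Int) :: st'.2) := by
      unfold pvFoldA
      rw [hrange, List.foldl_append, List.foldl_cons, List.foldl_nil]
    have hBstep : pvFoldB hs k (m + 1) =
        pvScanB hs (m : Int) none (pvFoldB hs k m)
          (PySem.List.pyRange ((m : Int) - 1) (max 0 ((m : Int) - k) - 1) (-1)) := by
      unfold pvFoldB
      rw [hrange, List.foldl_append, List.foldl_cons, List.foldl_nil]
    have hfresh : ∀ t ∈ pvStack hs (m : Int), pvH hs t < pvH hs (m : Int) →
        (pvFoldA hs k m).1.contains t = false := by
      intro t ht _
      exact pvFresh hs (m : Int) _ (fun p hp => (ihP p hp).2) t (mem_pvStack hs _ t ht).2.2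
    obtain ⟨hPi, hPs⟩ := pvPopA_spec hs k (m : Int) (pvStack hs (m : Int)) (pvFoldA hs k m).1
      (pvStack_pairwise hs (m : Int)) hfresh
    rw [ihS] at hAstep
    refine ⟨?_, ?_, ?_⟩
    · rw [hAstep]
      show (m : Int) :: (pvPopA hs k (m : Int) (pvFoldA hs k m).1 (pvStack hs (m : Int))).2
          = pvStack hs ((m + 1 : Nat) : Int)
      rw [hPs, show ((m + 1 : Nat) : Int) = (m : Int) + 1 by push_cast; ring,
        pvStack_succ hs (m : Int) (Int.natCast_nonneg m)]
    · rw [hAstep]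
      show ∀ p ∈ (pvPopA hs k (m : Int) (pvFoldA hs k m).1 (pvStack hs (m : Int))).1.items, _
      rw [hPi]
      intro p hp
      rcases List.mem_append.1 hp with h | h
      · have := ihP p h
        refine ⟨this.1, this.2.1, by push_cast; omega, this.2.2.2⟩
      · obtain ⟨t, ht, hpt⟩ := List.mem_map.1 h
        have hmem := mem_pvStack hs (m : Int) t (List.mem_of_mem_filter ht)
        have hcond := List.of_mem_filter ht
        simp only [Bool.and_eq_true, decide_eq_true_eq] at hcond
        subst hpt
        exact ⟨hmem.1, hmem.2.1, by push_cast; omega, hcond.1⟩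
    · rw [hAstep, hBstep, ihB]
      show pvScanB hs (m : Int) none (pvFoldA hs k m).1 _
          = (pvPopA hs k (m : Int) (pvFoldA hs k m).1 (pvStack hs (m : Int))).1
      apply PySem.Dict.ext
      rw [hPi, pvScanRound hs k (m : Int) (pvFoldA hs k m).1
        (fun t hq => pvFresh hs (m : Int) _ (fun p hp => (ihP p hp).2) t hq)]
      rw [pvE_eq hs k (m : Int)]

-- ===== VERDICT (by name: the statement is the Claim_ definition above) =====
theorem get_next_position_spec : Claim_equal_get_next_position := by
  intro hs k _
  unfold Spec_get_next_position
  exact (congrArg PySem.Dict.items (pvMain hs k hs.length).2.2).symm
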